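-- pv_equiv track=rewrite | github.com/leonardo-finardi/blackjack-python | blackjack.py | get_card_count
-- ===== SOURCE A (Python) =====
-- def get_card_count(deck):
--     card_values = {
--         '2': -1,
--         '3': -1,
--         '4': -1,
--         '5': -1,
--         '6': -1,
--         '7': 0,
--         '8': 0,
--         '9': 0,
--         '10': 1,
--         'J': 1,
--         'Q': 1,
--         'K': 1,
--         'A': 1
--     }
--     count = 0
--     for card in deck:
--         if (card[0]=="10"):
--             count += int(card_values.get(card[0]))
--         else:
--             count += int(card_values.get(card[0][0]))
--     return count
-- ===== SOURCE B (Python) =====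
-- def get_card_count(deck):
--     keys = [card[0] if card[0] == "10" else card[0][0] for card in deck]
--     high = ('10', 'J', 'Q', 'K', 'A')
--     low = ('2', '3', '4', '5', '6')
--     return sum(k in high for k in keys) - sum(k in low for k in keys)
-- ===== Notes on version B (the rewrite author's own statement) =====
-- stated objective: simpler
-- what changed: B drops the value table and the running per-card sum: it maps the deck to its normalized keys once, then returns (number of keys in the high set {10,J,Q,K,A}) minus (number of keys in the low set {2..6}).
import Mathlib
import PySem

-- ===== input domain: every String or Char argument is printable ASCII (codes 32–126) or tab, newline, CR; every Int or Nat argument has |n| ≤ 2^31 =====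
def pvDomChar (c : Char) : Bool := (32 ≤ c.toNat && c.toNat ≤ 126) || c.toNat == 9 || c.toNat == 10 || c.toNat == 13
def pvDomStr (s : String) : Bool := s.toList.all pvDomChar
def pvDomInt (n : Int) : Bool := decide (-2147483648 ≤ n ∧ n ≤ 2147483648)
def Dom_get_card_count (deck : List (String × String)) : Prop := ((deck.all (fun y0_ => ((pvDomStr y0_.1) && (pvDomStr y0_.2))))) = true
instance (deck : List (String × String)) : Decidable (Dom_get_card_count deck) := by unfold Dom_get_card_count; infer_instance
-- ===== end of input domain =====

-- B replaces A's per-card dict-lookup running sum by classify-and-count: map each card to its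
-- normalized key, then return (#high keys) - (#low keys); no value table (objective: simpler).


-- ===== PORT A =====
-- the card_values dict of A
def cardValues : PySem.Dict String Int :=
  PySem.Dict.ofList [("2", -1), ("3", -1), ("4", -1), ("5", -1), ("6", -1),
                     ("7", 0), ("8", 0), ("9", 0),
                     ("10", 1), ("J", 1), ("Q", 1), ("K", 1), ("A", 1)]

-- card[0][0] as a 1-char string; "" stands for the IndexError case, excluded by Pre_
def firstCharKey (r : String) : String :=
  match PySem.Str.pyGet? r 0 with
  | some c => String.mk [c]
  | none => ""

-- int(card_values.get(key)): on an unknown key Python raises TypeError (int(None)); those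
-- inputs are excluded by Pre_, so the getD default 0 is never the returned value on Pre_.
def get_card_count (deck : List (String × String)) : Int :=
  deck.foldl (fun count card =>
    if card.1 = "10" then count + cardValues.getD card.1 0
    else count + cardValues.getD (firstCharKey card.1) 0) 0

-- ===== PORT B =====
def highKeys : List String := ["10", "J", "Q", "K", "A"]
def lowKeys : List String := ["2", "3", "4", "5", "6"]

-- keys = [card[0] if card[0] == "10" else card[0][0] for card in deck];
-- return sum(k in high for k in keys) - sum(k in low for k in keys)
def get_card_count_alt (deck : List (String × String)) : Int :=
  let keys := deck.map (fun card => if card.1 = "10" then card.1 else firstCharKey card.1)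
  ((keys.filter (fun k => highKeys.contains k)).length : Int)
    - ((keys.filter (fun k => lowKeys.contains k)).length : Int)

-- ===== PRECONDITION & SPEC =====
-- Pre_ excludes exactly the inputs where A raises: a card with an empty rank string
-- (IndexError on card[0][0]) or whose normalized key is not in card_values (TypeError on int(None)).
def Pre_get_card_count (deck : List (String × String)) : Prop :=
  (deck.all (fun card =>
    card.1 == "10" ||
    (match card.1.toList with
     | [] => false
     | c :: _ => ['2', '3', '4', '5', '6', '7', '8', '9', 'J', 'Q', 'K', 'A'].contains c))) = true
instance (deck : List (String × String)) : Decidable (Pre_get_card_count deck) := by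
  unfold Pre_get_card_count; infer_instance

def pvWitness_get_card_count : (List (String × String)) :=
  [("A", "spades"), ("10", "hearts"), ("2", "clubs")]

def Spec_get_card_count (deck : List (String × String)) (out : Int) : Prop := out = get_card_count_alt deck
instance (deck : List (String × String)) (out : Int) : Decidable (Spec_get_card_count deck out) := by unfold Spec_get_card_count; infer_instance

-- ===== CLAIM (what is proved, stated in full; the proofs are below) =====
def Claim_equal_get_card_count : Prop := ∀ (deck : List (String × String)), Dom_get_card_count deck → Pre_get_card_count deck → Spec_get_card_count deck (get_card_count deck)

-- ===== LEMMAS AND PROOFS =====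

-- the normalized key of a card (proof-side abbreviation of the expression both ports use)
def normKey (card : String × String) : String :=
  if card.1 = "10" then card.1 else firstCharKey card.1

-- A's per-card value
def valueOf (card : String × String) : Int :=
  if card.1 = "10" then cardValues.getD card.1 0 else cardValues.getD (firstCharKey card.1) 0

lemma A_eq_sum (deck : List (String × String)) :
    get_card_count deck = (deck.map valueOf).sum := by
  unfold get_card_count
  rw [PySem.List.foldl_congr_mem deck _ (fun count card => count + valueOf card) 0
        (by intro acc x _; dsimp only; unfold valueOf; split_ifs <;> rfl),
      PySem.List.foldl_add]
  simp

lemma alt_cons (card : String × String) (t : List (String × String)) :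
    get_card_count_alt (card :: t)
      = ((if highKeys.contains (normKey card) then 1 else 0)
          - (if lowKeys.contains (normKey card) then 1 else 0)) + get_card_count_alt t := by
  unfold get_card_count_alt normKey
  simp only [List.map_cons, List.filter_cons]
  split_ifs <;> push_cast [List.length_cons] <;> ring

-- on an admitted card, A's table value equals B's high/low classification
lemma value_eq_class (card : String × String)
    (h : (card.1 == "10" ||
          (match card.1.toList with
           | [] => false
           | c :: _ => ['2', '3', '4', '5', '6', '7', '8', '9', 'J', 'Q', 'K', 'A'].contains c)) = true) :
    valueOf card = (if highKeys.contains (normKey card) then 1 else 0)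
                    - (if lowKeys.contains (normKey card) then 1 else 0) := by
  unfold valueOf normKey
  rcases Bool.or_eq_true_iff.mp h with h10 | hc
  · have : card.1 = "10" := by simpa using h10
    simp only [this]; decide
  · by_cases h10 : card.1 = "10"
    · simp only [h10]; decide
    · rcases hl : card.1.toList with _ | ⟨c, rest⟩
      · rw [hl] at hc; simp at hc
      · rw [hl] at hc
        have hk : firstCharKey card.1 = String.mk [c] := by
          unfold firstCharKey
          simp [hl]
        simp only [if_neg h10, hk]
        simp only [List.contains_eq_mem, decide_eq_true_eq, List.mem_cons,
          List.not_mem_nil, or_false] at hc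
        rcases hc with rfl | rfl | rfl | rfl | rfl | rfl | rfl | rfl | rfl | rfl | rfl | rfl <;> decide

-- ===== VERDICT (by name: the statement is the Claim_ definition above) =====
lemma main_eq (deck : List (String × String))
    (hpre : ∀ card ∈ deck, (card.1 == "10" ||
        (match card.1.toList with
         | [] => false
         | c :: _ => ['2', '3', '4', '5', '6', '7', '8', '9', 'J', 'Q', 'K', 'A'].contains c)) = true) :
    get_card_count deck = get_card_count_alt deck := by
  induction deck with
  | nil => decide
  | cons card t ih =>
    have hcard := hpre card List.mem_cons_self
    have ht := ih (fun x hx => hpre x (List.mem_cons_of_mem _ hx))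
    rw [A_eq_sum] at ht ⊢
    simp only [List.map_cons, List.sum_cons]
    rw [alt_cons, ← ht, value_eq_class card hcard]

-- ===== VERDICT =====
theorem get_card_count_spec : Claim_equal_get_card_count := by
  intro deck _ hpre
  unfold Spec_get_card_count
  unfold Pre_get_card_count at hpre
  exact main_eq deck (List.all_eq_true.mp hpre)
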